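-- pv_equiv track=rewrite | github.com/Klaudia1303/student_code_analysis | Progetto-tirocinio2024/data/student_data/2063847_Cascioli/LabPython07/LabPython07/A_Ex9.py | A_Ex9
-- ===== SOURCE A (Python) =====
-- def A_Ex9(l):
--     l1=[]
--     max1=0
--     max_p=""
--     parola=""
--     for i in range(len(l)):
--         parola=l[i]
--         for j in range(len(parola)):
--             if (parola.count(parola[j])>max1):
--                 max1=parola.count(parola[j])
--                 max_p=parola[j]
--             elif(parola.count(parola[j])==max1 and ord(parola[j])<ord(max_p)):
--                 max1=parola.count(parola[j])
--                 max_p=parola[j]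
--         l1.append(max_p)
--         max1=0
--         max_p=""
--     return(l1)
-- ===== SOURCE B (Python) =====
-- def A_Ex9(l):
--     out = []
--     for parola in l:
--         counts = {}
--         for ch in parola:
--             counts[ch] = counts.get(ch, 0) + 1
--         best = ''
--         best_k = 0
--         for ch, k in counts.items():
--             if k > best_k or (k == best_k and ch < best):
--                 best, best_k = ch, k
--         out.append(best)
--     return out
-- ===== Notes on version B (the rewrite author's own statement) =====
-- stated objective: faster
-- what changed: A recomputes word.count(ch) at every character position (quadratic per word); B builds a character-count dict in one pass over the word and then picks the best (highest count, ties to smallest char) in one scan of the dict's items.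
import Mathlib
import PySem

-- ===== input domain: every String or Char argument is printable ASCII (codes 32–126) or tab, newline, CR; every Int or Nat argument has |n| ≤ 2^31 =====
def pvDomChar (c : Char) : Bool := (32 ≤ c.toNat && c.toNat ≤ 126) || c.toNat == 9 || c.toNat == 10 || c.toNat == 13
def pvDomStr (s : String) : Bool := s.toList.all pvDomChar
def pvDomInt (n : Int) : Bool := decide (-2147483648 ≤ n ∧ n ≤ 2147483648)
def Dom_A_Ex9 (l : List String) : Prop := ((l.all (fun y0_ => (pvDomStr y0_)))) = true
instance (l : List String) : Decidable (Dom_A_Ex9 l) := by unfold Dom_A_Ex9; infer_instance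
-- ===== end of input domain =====

-- B replaces A's per-position recount (str.count inside the inner loop, quadratic per word)
-- by a counts dict built in one pass followed by one scan of its items (objective: faster).
-- In both ports the Python sentinel max_p/best = "" (no best yet) is transliterated as
-- Option.none; Python's comparison ch < '' is False, matching the none-branch False, and in
-- A the elif's ord(max_p) is only reached with max_p nonempty (ord('') would raise, but that
-- state is unreachable since any present char has count ≥ 1 > 0).

-- ===== PORT A =====
-- parola.count(parola[j]) for the single char parola[j] is its character count.
def A_cnt (cs : List Char) (c : Char) : Int := (cs.count c : Int)

-- one inner-loop iteration of A: state = (max1, max_p)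
-- ord(x) < ord(y) on single chars is the character order; '< ""' (no best yet) is False
def ltOpt (c : Char) (b : Option Char) : Bool :=
  match b with | some b => decide (c < b) | none => false

def A_step (cs : List Char) (s : Int × Option Char) (c : Char) : Int × Option Char :=
  if A_cnt cs c > s.1 then (A_cnt cs c, some c)
  else if A_cnt cs c = s.1 ∧ ltOpt c s.2 then (A_cnt cs c, some c)
  else s

def A_Ex9 (l : List String) : List String :=
  l.foldl (fun l1 parola =>
    let cs := parola.toList
    let r := cs.foldl (A_step cs) (0, none)
    l1 ++ [match r.2 with | some c => c.toString | none => ""]) []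

-- ===== PORT B =====
-- one iteration of B's scan over counts.items(): state = (best_k, best)
def B_step (s : Int × Option Char) (p : Char × Int) : Int × Option Char :=
  if p.2 > s.1 ∨ (p.2 = s.1 ∧ ltOpt p.1 s.2) then (p.2, some p.1)
  else s

def A_Ex9_alt (l : List String) : List String :=
  l.foldl (fun out parola =>
    let counts := parola.toList.foldl
      (fun d ch => d.insert ch (d.getD ch 0 + 1)) (PySem.Dict.empty : PySem.Dict Char Int)
    let r := counts.items.foldl B_step (0, none)
    out ++ [match r.2 with | some c => c.toString | none => ""]) []

-- ===== PRECONDITION & SPEC =====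
def Spec_A_Ex9 (l : List String) (out : List String) : Prop := out = A_Ex9_alt l
instance (l : List String) (out : List String) : Decidable (Spec_A_Ex9 l out) := by unfold Spec_A_Ex9; infer_instance

-- ===== CLAIM (what is proved, stated in full; the proofs are below) =====
def Claim_equal_A_Ex9 : Prop := ∀ (l : List String), Dom_A_Ex9 l → Spec_A_Ex9 l (A_Ex9 l)

-- ===== LEMMAS AND PROOFS =====

-- 'c beats b' in A's preference: strictly more occurrences in cs, or as many and smaller.
def Better (cs : List Char) (c b : Char) : Prop :=
  A_cnt cs c > A_cnt cs b ∨ (A_cnt cs c = A_cnt cs b ∧ c < b)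

theorem Better_trans {cs : List Char} {a b c : Char}
    (h1 : Better cs a b) (h2 : Better cs b c) : Better cs a c := by
  rcases h1 with h1 | ⟨h1, h1'⟩ <;> rcases h2 with h2 | ⟨h2, h2'⟩
  · exact Or.inl (lt_trans h2 h1)
  · exact Or.inl (h2 ▸ h1)
  · exact Or.inl (h1 ▸ h2)
  · exact Or.inr ⟨h1.trans h2, lt_trans h1' h2'⟩

theorem Better_irrefl (cs : List Char) (c : Char) : ¬ Better cs c c := by
  rintro (h | ⟨_, h⟩) <;> exact lt_irrefl _ h

-- the loop invariant shared by both ports' scans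
def WInv (cs seen : List Char) (s : Int × Option Char) : Prop :=
  match s.2 with
  | none => seen = [] ∧ s.1 = 0
  | some b => b ∈ seen ∧ s.1 = A_cnt cs b ∧ ∀ c ∈ seen, ¬ Better cs c b

-- the effective state transition is the same function in both ports
theorem B_step_eq_A_step (cs : List Char) (s : Int × Option Char) (c : Char) :
    B_step s (c, A_cnt cs c) = A_step cs s c := by
  unfold B_step A_step
  rcases s with ⟨m, b⟩
  by_cases h1 : A_cnt cs c > m <;>
    by_cases h2 : A_cnt cs c = m ∧ ltOpt c b <;>
    simp [h1, h2]

theorem WInv_step {cs seen : List Char} {s : Int × Option Char} {c : Char}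
    (hc : c ∈ cs) (h : WInv cs seen s) : WInv cs (seen ++ [c]) (A_step cs s c) := by
  have hcnt : (0 : Int) < A_cnt cs c := by
    simpa [A_cnt] using List.count_pos_iff.2 hc
  rcases s with ⟨m, b⟩
  unfold A_step
  rcases b with _ | b
  · rcases h with ⟨hseen, hm⟩
    subst hseen hm
    simp only [gt_iff_lt]
    rw [if_pos hcnt]
    exact ⟨by simp, rfl, by simpa using Better_irrefl cs c⟩
  · rcases h with ⟨hb, hm, hbest⟩
    subst hm
    by_cases h1 : A_cnt cs c > A_cnt cs b
    · rw [if_pos h1]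
      refine ⟨by simp, rfl, ?_⟩
      intro d hd
      rcases List.mem_append.1 hd with hd | hd
      · intro hdc
        exact hbest d hd (Better_trans hdc (Or.inl h1))
      · simp at hd; subst hd; exact Better_irrefl cs d
    · rw [if_neg h1]
      by_cases h2 : A_cnt cs c = A_cnt cs b ∧ c < b
      · rw [if_pos (by simpa [ltOpt] using h2)]
        refine ⟨by simp, by simp [h2.1], ?_⟩
        intro d hd
        rcases List.mem_append.1 hd with hd | hd
        · intro hdc
          exact hbest d hd (Better_trans hdc (Or.inr h2))
        · simp at hd; subst hd; exact Better_irrefl cs d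
      · rw [if_neg (by simpa [ltOpt] using h2)]
        refine ⟨List.mem_append_left _ hb, rfl, ?_⟩
        intro d hd
        rcases List.mem_append.1 hd with hd | hd
        · exact hbest d hd
        · simp at hd; subst hd
          intro hdb
          rcases hdb with hdb | hdb
          · exact h1 hdb
          · exact h2 hdb

theorem WInv_foldl {cs : List Char} (rest : List Char) (hsub : ∀ c ∈ rest, c ∈ cs)
    {seen : List Char} {s : Int × Option Char} (h : WInv cs seen s) :
    WInv cs (seen ++ rest) (rest.foldl (A_step cs) s) := by
  induction rest generalizing seen s with
  | nil => simpa using h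
  | cons c r ih =>
    have := ih (fun d hd => hsub d (List.mem_cons_of_mem _ hd))
      (WInv_step (hsub c (List.mem_cons_self)) h)
    simpa using this

-- the final per-word answers agree: any two states satisfying the full-coverage invariant are equal
theorem WInv_unique {cs seen seen' : List Char}
    (hmem : ∀ c, c ∈ seen ↔ c ∈ cs) (hmem' : ∀ c, c ∈ seen' ↔ c ∈ cs)
    {s s' : Int × Option Char} (h : WInv cs seen s) (h' : WInv cs seen' s') : s = s' := by
  rcases s with ⟨m, b⟩; rcases s' with ⟨m', b'⟩
  rcases b with _ | b <;> rcases b' with _ | b'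
  · rcases h with ⟨h1, h2⟩; rcases h' with ⟨h1', h2'⟩
    simp only [Prod.mk.injEq]
    exact ⟨h2.trans h2'.symm, trivial⟩
  · rcases h with ⟨h1, _⟩; rcases h' with ⟨hb', _, _⟩
    exact absurd ((hmem _).2 ((hmem' _).1 hb')) (by simp [h1])
  · rcases h' with ⟨h1', _⟩; rcases h with ⟨hb, _, _⟩
    exact absurd ((hmem' _).2 ((hmem _).1 hb)) (by simp [h1'])
  · rcases h with ⟨hb, hm, hbest⟩; rcases h' with ⟨hb', hm', hbest'⟩
    have hbb' : b = b' := by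
      have n1 : ¬ Better cs b' b := hbest b' ((hmem _).2 ((hmem' _).1 hb'))
      have n2 : ¬ Better cs b b' := hbest' b ((hmem' _).2 ((hmem _).1 hb))
      by_contra hne
      rcases lt_or_gt_of_ne hne with hlt | hgt
      · rcases lt_trichotomy (A_cnt cs b) (A_cnt cs b') with hc | hc | hc
        · exact n1 (Or.inl hc)
        · exact n2 (Or.inr ⟨hc, hlt⟩)
        · exact n2 (Or.inl hc)
      · rcases lt_trichotomy (A_cnt cs b) (A_cnt cs b') with hc | hc | hc
        · exact n1 (Or.inl hc)
        · exact n1 (Or.inr ⟨hc.symm, hgt⟩)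
        · exact n2 (Or.inl hc)
    subst hbb'
    simp only [Prod.mk.injEq]
    exact ⟨hm.trans hm'.symm, trivial⟩

theorem foldl_map_cnt (cs : List Char) (ds : List Char) (init : Int × Option Char) :
    (ds.map (fun k => (k, (cs.count k : Int)))).foldl B_step init =
      ds.foldl (A_step cs) init := by
  induction ds generalizing init with
  | nil => rfl
  | cons d t ih =>
    simp only [List.map_cons, List.foldl_cons, ih]
    rw [show ((List.count d cs : Int)) = A_cnt cs d from rfl, B_step_eq_A_step cs init d]

-- per-word equality of the two ports' scans
theorem word_eq (cs : List Char) :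
    cs.foldl (A_step cs) (0, none) =
      ((cs.foldl (fun d ch => d.insert ch (d.getD ch 0 + 1))
          (PySem.Dict.empty : PySem.Dict Char Int)).items.foldl B_step (0, none)) := by
  have hinit : WInv cs [] ((0 : Int), (none : Option Char)) := ⟨rfl, rfl⟩
  have hA : WInv cs cs (cs.foldl (A_step cs) (0, none)) := by
    simpa using WInv_foldl cs (fun _ h => h) hinit
  have hcounter : (cs.foldl (fun d ch => d.insert ch (d.getD ch 0 + 1))
      (PySem.Dict.empty : PySem.Dict Char Int)) = PySem.Dict.counter cs :=
    PySem.Dict.foldl_insert_getD_add_one_eq_counter cs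
  have hitems : (PySem.Dict.counter cs).items =
      (PySem.Set.ofList cs).map (fun k => (k, (cs.count k : Int))) :=
    PySem.Dict.items_counter cs
  have hfold : ((PySem.Set.ofList cs).map (fun k => (k, (cs.count k : Int)))).foldl B_step
        ((0 : Int), (none : Option Char)) =
      (PySem.Set.ofList cs : List Char).foldl (A_step cs) (0, none) :=
    foldl_map_cnt cs (PySem.Set.ofList cs) (0, none)
  have hB : WInv cs (PySem.Set.ofList cs)
      (((cs.foldl (fun d ch => d.insert ch (d.getD ch 0 + 1))
          (PySem.Dict.empty : PySem.Dict Char Int)).items.foldl B_step (0, none))) := by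
    rw [hcounter, hitems, hfold]
    simpa using WInv_foldl (PySem.Set.ofList cs)
      (fun c h => (PySem.Set.mem_ofList cs c).1 h) hinit
  exact WInv_unique (fun _ => Iff.rfl) (fun c => PySem.Set.mem_ofList cs c) hA hB

theorem foldl_append_eq_map {α β : Type} (g : α → β) (l : List α) (acc : List β) :
    l.foldl (fun a x => a ++ [g x]) acc = acc ++ l.map g := by
  induction l generalizing acc with
  | nil => simp
  | cons x t ih => simp [ih]

-- ===== VERDICT (by name: the statement is the Claim_ definition above) =====
theorem A_Ex9_spec : Claim_equal_A_Ex9 := by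
  intro l _
  unfold Spec_A_Ex9 A_Ex9 A_Ex9_alt
  rw [foldl_append_eq_map, foldl_append_eq_map, List.map_inj_left.2]
  intro parola _
  rw [word_eq parola.toList]
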